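-- pv_equiv track=rewrite | github.com/mungonkim/CODING_TEST_PRACTICE | 프로그래머스/0/181880. 1로 만들기/1로 만들기.py | solution
-- ===== SOURCE A (Python) =====
-- def solution(num_list):
--     answer = 0
--     for i in num_list:
--         while True:
--             if i == 1:
--                 break
--             if i % 2 == 0:
--                 i = i // 2
--                 answer += 1
--             elif i % 2 != 0:
--                 i = (i-1) / 2
--                 answer += 1
--     return answer
-- ===== SOURCE B (Python) =====
-- def solution(num_list):
--     # each reduction step (i//2 for even, (i-1)/2 for odd) strips exactly the
--     # lowest bit, so a positive integer i reaches 1 in bit_length(i)-1 steps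
--     return sum(i.bit_length() - 1 for i in num_list)
-- ===== Notes on version B (the rewrite author's own statement) =====
-- stated objective: simpler
-- what changed: Replaced A's per-element while-loop reduction with the closed form bit_length(i)-1 summed in a single pass.
import Mathlib
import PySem

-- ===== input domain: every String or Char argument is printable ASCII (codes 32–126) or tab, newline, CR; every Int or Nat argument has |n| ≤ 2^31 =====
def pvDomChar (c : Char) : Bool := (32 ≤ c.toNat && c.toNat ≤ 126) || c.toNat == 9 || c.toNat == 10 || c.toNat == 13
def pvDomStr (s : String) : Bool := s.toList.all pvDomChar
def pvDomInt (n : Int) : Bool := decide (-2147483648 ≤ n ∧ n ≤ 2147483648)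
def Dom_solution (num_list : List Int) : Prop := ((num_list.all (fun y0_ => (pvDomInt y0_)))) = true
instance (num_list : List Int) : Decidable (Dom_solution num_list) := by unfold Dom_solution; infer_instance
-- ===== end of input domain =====

-- B replaces A's per-element reduction while-loop by the closed form bit_length(i)-1, summed in one pass (simpler).


-- ===== PORT A =====
-- A's while-loop for one element: counts steps until i reaches 1.
-- In Python the odd branch computes (i-1)/2 with true division; on Pre_ (i ≥ 1, |i| ≤ 2^31)
-- i-1 is even and the float is exact and integer-valued, so PySem.Int.floordiv is exact here.
-- The guard is 'i ≤ 1' instead of A's 'i == 1' only to make the loop total (A diverges for i ≤ 0,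
-- excluded by Pre_; on Pre_ the loop variable stays ≥ 1, where the two guards coincide).
def solutionLoop (i : Int) : Int :=
  if _h : i ≤ 1 then 0
  else if i % 2 == 0 then 1 + solutionLoop (PySem.Int.floordiv i 2)
  else 1 + solutionLoop (PySem.Int.floordiv (i - 1) 2)
termination_by i.toNat
decreasing_by
  · simp only [PySem.Int.floordiv, Int.fdiv_eq_ediv]; omega
  · simp only [PySem.Int.floordiv, Int.fdiv_eq_ediv]; omega

def solution (num_list : List Int) : Int :=
  num_list.foldl (fun answer i => answer + solutionLoop i) 0

-- ===== PORT B =====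
-- i.bit_length() = Nat.size |i| exactly (Python takes the absolute value's bit length).
def solution_alt (num_list : List Int) : Int :=
  num_list.foldl (fun acc i => acc + ((Nat.size i.natAbs : Int) - 1)) 0

-- ===== PRECONDITION & SPEC =====
-- Pre_ excludes lists with an element ≤ 0: A's while-loop never terminates there (0 and
-- negative numbers never reach 1), so A returns no value on those inputs.
def Pre_solution (num_list : List Int) : Prop := ∀ i ∈ num_list, 1 ≤ i
instance (num_list : List Int) : Decidable (Pre_solution num_list) := by unfold Pre_solution; infer_instance
def pvWitness_solution : List Int := [1, 2, 7, 1000]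

def Spec_solution (num_list : List Int) (out : Int) : Prop := out = solution_alt num_list
instance (num_list : List Int) (out : Int) : Decidable (Spec_solution num_list out) := by unfold Spec_solution; infer_instance

-- ===== CLAIM (what is proved, stated in full; the proofs are below) =====
def Claim_equal_solution : Prop := ∀ (num_list : List Int), Dom_solution num_list → Pre_solution num_list → Spec_solution num_list (solution num_list)

-- ===== LEMMAS AND PROOFS =====

lemma size_div2 (n : ℕ) (h : 2 ≤ n) : n.size = (n / 2).size + 1 := by
  conv_lhs => rw [← Nat.bit_bodd_div2 n]
  rw [Nat.size_bit, Nat.div2_val]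
  rw [Nat.bit_bodd_div2]; omega

lemma loop_eq_size (i : Int) (h : 1 ≤ i) : solutionLoop i = (Nat.size i.natAbs : Int) - 1 := by
  rw [solutionLoop]
  by_cases h1 : i ≤ 1
  · have : i = 1 := le_antisymm h1 h
    subst this; simp [Nat.size]
  · have h2 : 2 ≤ i := by omega
    have hdiv : PySem.Int.floordiv i 2 = i / 2 := by
      simp [PySem.Int.floordiv, Int.fdiv_eq_ediv]
    have hpos : 1 ≤ i / 2 := by omega
    have hrec := loop_eq_size (i / 2) hpos
    have hna : i.natAbs / 2 = (i / 2).natAbs := by omega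
    have hsz := size_div2 i.natAbs (by omega)
    rw [hna] at hsz
    rw [dif_neg h1]
    by_cases hpar : (i % 2 == 0) = true
    · rw [if_pos hpar, hdiv, hrec, hsz]; push_cast; ring
    · have hodd : i % 2 = 1 := by
        simp only [beq_iff_eq] at hpar; omega
      have hdiv' : PySem.Int.floordiv (i - 1) 2 = i / 2 := by
        simp only [PySem.Int.floordiv, Int.fdiv_eq_ediv]; omega
      rw [if_neg hpar, hdiv', hrec, hsz]; push_cast; ring
termination_by i.toNat
decreasing_by omega

-- ===== VERDICT (by name: the statement is the Claim_ definition above) =====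
theorem solution_spec : Claim_equal_solution := by
  intro l _ hpre
  unfold Spec_solution solution solution_alt
  have key : ∀ (l : List Int), (∀ i ∈ l, 1 ≤ i) → ∀ (acc : Int),
      l.foldl (fun answer i => answer + solutionLoop i) acc =
      l.foldl (fun acc i => acc + ((Nat.size i.natAbs : Int) - 1)) acc := by
    intro l hl
    induction l with
    | nil => intro acc; rfl
    | cons a t ih =>
      intro acc
      simp only [List.foldl_cons]
      rw [loop_eq_size a (hl a (by simp))]
      exact ih (fun i hi => hl i (by simp [hi])) _
  exact key l hpre 0
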